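-- pv_equiv track=rewrite | github.com/andr-vg/TrabajoFinalPython | TrabajoFinalPython/scrabbleAR/ObtenerPalabraCompu.py | mapear_tablero
-- ===== SOURCE A (Python) =====
-- def mapear_tablero(posiciones_ocupadas_tablero, long_tablero):
--     """ Esta funcion recibe las posiciones ocupadas en el tablero, mapea lugares disponibles y los devuelve
--         en un diccionario long_y_posiciones cuyas claves son la longitud del lugar disponible y valores son
--         listas con las posiciones disponibles de esas longitudes
--         Observar que el diccionario solo se queda con las primeras longitudes que encuentre, es decir,
--         si la fila i tiene 2 zonas con 3 lugares disponibles, se queda con la primera. Lo mismo por filas.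
--     """
--     long_y_posiciones = dict()
--     for i in range(long_tablero):
--         j = 0
--         while j < long_tablero:
--             cant = 0
--             posiciones = []
--             while not (i,j) in posiciones_ocupadas_tablero and j < long_tablero:
--                 cant += 1
--                 posiciones.append((i,j))
--                 j += 1
--             if cant >= 2 and not cant in long_y_posiciones.keys():
--                 long_y_posiciones[cant] = posiciones
--             j += 1
--     return long_y_posiciones
-- ===== SOURCE B (Python) =====
-- def mapear_tablero(posiciones_ocupadas_tablero, long_tablero):
--     """Locate occupied boundaries per row, then emit each gap segment at once."""
--     occupied = set(posiciones_ocupadas_tablero)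
--     long_y_posiciones = {}
--     for i in range(long_tablero):
--         occ = [c for c in range(long_tablero) if (i, c) in occupied]
--         start = 0
--         for b in occ + [long_tablero]:
--             length = b - start
--             if length >= 2 and length not in long_y_posiciones:
--                 long_y_posiciones[length] = [(i, k) for k in range(start, b)]
--             start = b + 1
--     return long_y_posiciones
-- ===== Notes on version B (the rewrite author's own statement) =====
-- stated objective: alternative
-- what changed: Replaces A's nested while-loops that grow each run cell by cell with a set of occupied positions plus a per-row locate-boundaries-then-emit-gaps pass: the occupied columns of each row are collected once, and each gap segment is produced in one step from its two boundaries.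
import Mathlib
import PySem

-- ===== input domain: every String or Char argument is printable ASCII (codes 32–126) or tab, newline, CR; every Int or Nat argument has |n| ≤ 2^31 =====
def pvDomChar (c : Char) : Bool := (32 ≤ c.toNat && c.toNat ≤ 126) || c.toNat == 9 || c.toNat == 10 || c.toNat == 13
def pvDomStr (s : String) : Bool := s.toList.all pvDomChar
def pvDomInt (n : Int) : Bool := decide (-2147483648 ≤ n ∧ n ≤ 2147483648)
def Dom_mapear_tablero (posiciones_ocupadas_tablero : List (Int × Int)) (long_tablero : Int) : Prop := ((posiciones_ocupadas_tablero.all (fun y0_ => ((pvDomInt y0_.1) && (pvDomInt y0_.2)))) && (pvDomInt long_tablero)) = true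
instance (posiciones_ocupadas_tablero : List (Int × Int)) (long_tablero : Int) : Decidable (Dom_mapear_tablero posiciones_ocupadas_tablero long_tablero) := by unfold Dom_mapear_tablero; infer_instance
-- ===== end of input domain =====

-- B maps each row's free runs from the occupied-column boundaries (one emit per gap)
-- instead of A's cell-by-cell nested while accumulation; alternative decomposition, same results.

-- ===== PORT A =====
-- inner while: 'while not (i,j) in posiciones_ocupadas_tablero and j < long_tablero: cant+=1; posiciones.append((i,j)); j+=1'
-- (fuel is a pure totality guard: it starts at long_tablero.toNat and never runs out while j < n)
def pvRunA (occ : List (Int × Int)) (n i : Int) : Nat → Int → Int → List (Int × Int) →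
    Int × List (Int × Int) × Int
  | 0, j, cant, pos => (cant, pos, j)
  | fuel + 1, j, cant, pos =>
    if ¬ ((i, j) ∈ occ) ∧ j < n then
      pvRunA occ n i fuel (j + 1) (cant + 1) (pos ++ [(i, j)])
    else
      (cant, pos, j)

-- outer while: 'while j < long_tablero: … ; if cant >= 2 and not cant in long_y_posiciones.keys(): …; j += 1'
def pvRowA (occ : List (Int × Int)) (n i : Int) : Nat → Int →
    PySem.Dict Int (List (Int × Int)) → PySem.Dict Int (List (Int × Int))
  | 0, _, d => d
  | fuel + 1, j, d =>
    if j < n then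
      let r := pvRunA occ n i n.toNat j 0 []
      let d' := if r.1 ≥ 2 ∧ ¬ (d.contains r.1 = true) then d.insert r.1 r.2.1 else d
      pvRowA occ n i fuel (r.2.2 + 1) d'
    else
      d

def mapear_tablero (posiciones_ocupadas_tablero : List (Int × Int)) (long_tablero : Int) :
    List (Int × List (Int × Int)) :=
  ((PySem.List.pyRange 0 long_tablero 1).foldl
    (fun d i => pvRowA posiciones_ocupadas_tablero long_tablero i (long_tablero.toNat + 1) 0 d)
    PySem.Dict.empty).items

-- ===== PORT B =====
-- one row: fold over the boundaries occ ++ [long_tablero], emitting each gap [start, b)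
def pvRowB (n i : Int) (occCols : List Int)
    (res : PySem.Dict Int (List (Int × Int))) : PySem.Dict Int (List (Int × Int)) :=
  ((occCols ++ [n]).foldl
    (fun (p : PySem.Dict Int (List (Int × Int)) × Int) b =>
      let len := b - p.2
      let res' := if len ≥ 2 ∧ ¬ (p.1.contains len = true)
        then p.1.insert len ((PySem.List.pyRange p.2 b 1).map (fun k => (i, k)))
        else p.1
      (res', b + 1))
    (res, 0)).1

def mapear_tablero_alt (posiciones_ocupadas_tablero : List (Int × Int)) (long_tablero : Int) :
    List (Int × List (Int × Int)) :=
  let occupied := PySem.Set.ofList posiciones_ocupadas_tablero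
  ((PySem.List.pyRange 0 long_tablero 1).foldl
    (fun res i =>
      pvRowB long_tablero i
        ((PySem.List.pyRange 0 long_tablero 1).filter (fun c => (i, c) ∈ occupied)) res)
    PySem.Dict.empty).items

-- ===== PRECONDITION & SPEC =====
def Spec_mapear_tablero (posiciones_ocupadas_tablero : List (Int × Int)) (long_tablero : Int) (out : List (Int × List (Int × Int))) : Prop := out = mapear_tablero_alt posiciones_ocupadas_tablero long_tablero
instance (posiciones_ocupadas_tablero : List (Int × Int)) (long_tablero : Int) (out : List (Int × List (Int × Int))) : Decidable (Spec_mapear_tablero posiciones_ocupadas_tablero long_tablero out) := by unfold Spec_mapear_tablero; infer_instance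

-- ===== CLAIM (what is proved, stated in full; the proofs are below) =====
def Claim_equal_mapear_tablero : Prop := ∀ (posiciones_ocupadas_tablero : List (Int × Int)) (long_tablero : Int), Dom_mapear_tablero posiciones_ocupadas_tablero long_tablero → Spec_mapear_tablero posiciones_ocupadas_tablero long_tablero (mapear_tablero posiciones_ocupadas_tablero long_tablero)

-- ===== LEMMAS AND PROOFS =====

-- when the loop guard is already false, pvRunA returns immediately whatever the fuel
theorem pvRunA_stop (occ : List (Int × Int)) (n i : Int) (fuel : Nat) (j cant : Int)
    (pos : List (Int × Int)) (h : ¬ (¬ ((i, j) ∈ occ) ∧ j < n)) :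
    pvRunA occ n i fuel j cant pos = (cant, pos, j) := by
  cases fuel with
  | zero => rfl
  | succ fuel => rw [pvRunA, if_neg h]

-- A's inner while, started below the first occupied column b of the row segment [j, n),
-- consumes exactly the gap [j, b) and stops at b; and the filtered range decomposes around b.
theorem pvRunA_spec (occ : List (Int × Int)) (n i : Int) (p : Int → Bool)
    (hp : ∀ c, p c = decide ((i, c) ∈ occ)) :
    ∀ (fuel : Nat) (j cant : Int) (pos : List (Int × Int)), j < n → (n - j).toNat ≤ fuel →
    ∃ b, j ≤ b ∧ b ≤ n ∧
      pvRunA occ n i fuel j cant pos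
        = (cant + (b - j), pos ++ (PySem.List.pyRange j b 1).map (fun k => (i, k)), b) ∧
      (PySem.List.pyRange j n 1).filter p = (PySem.List.pyRange b n 1).filter p ∧
      (b < n → (PySem.List.pyRange b n 1).filter p
        = b :: (PySem.List.pyRange (b + 1) n 1).filter p) := by
  intro fuel
  induction fuel with
  | zero => intro j cant pos hj hf; exfalso; omega
  | succ fuel ih =>
    intro j cant pos hj hf
    by_cases hocc : (i, j) ∈ occ
    · -- the current cell j is occupied: b = j, empty gap
      refine ⟨j, le_refl j, by omega, ?_, rfl, ?_⟩
      · rw [pvRunA, if_neg (by simp [hocc]), PySem.List.pyRange_one_eq_nil (le_refl j)]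
        simp
      · intro _
        rw [PySem.List.pyRange_one_cons hj]
        simp only [List.filter_cons]
        have : p j = true := by rw [hp]; simp [hocc]
        simp [this]
    · by_cases hjn : j + 1 < n
      · obtain ⟨b, hb1, hb2, hrun, hfil, hhead⟩ :=
          ih (j + 1) (cant + 1) (pos ++ [(i, j)]) hjn (by omega)
        refine ⟨b, by omega, hb2, ?_, ?_, hhead⟩
        · rw [pvRunA, if_pos ⟨hocc, hj⟩, hrun]
          have : PySem.List.pyRange j b 1 = j :: PySem.List.pyRange (j + 1) b 1 :=
            PySem.List.pyRange_one_cons (by omega)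
          rw [this]
          simp [List.append_assoc]
          omega
        · rw [PySem.List.pyRange_one_cons hj]
          simp only [List.filter_cons]
          have : p j = false := by rw [hp]; simp [hocc]
          simp [this, hfil]
      · -- j + 1 = n (since j < n): the run ends at n after consuming cell j
        have hn : n = j + 1 := by omega
        refine ⟨n, by omega, le_refl n, ?_, ?_, by omega⟩
        · rw [pvRunA, if_pos ⟨hocc, hj⟩,
              pvRunA_stop occ n i fuel (j + 1) (cant + 1) (pos ++ [(i, j)]) (by omega)]
          subst hn
          rw [PySem.List.pyRange_one_cons (show j < j + 1 by omega),
              PySem.List.pyRange_one_eq_nil (le_refl (j + 1))]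
          simp
        · subst hn
          rw [PySem.List.pyRange_one_cons (show j < j + 1 by omega),
              PySem.List.pyRange_one_eq_nil (le_refl (j + 1))]
          simp only [List.filter_cons, List.filter_nil]
          have : p j = false := by rw [hp]; simp [hocc]
          simp [this]

-- when the loop guard is already false, pvRowA returns the dict whatever the fuel
theorem pvRowA_stop (occ : List (Int × Int)) (n i : Int) (fuel : Nat) (j : Int)
    (d : PySem.Dict Int (List (Int × Int))) (h : ¬ j < n) :
    pvRowA occ n i fuel j d = d := by
  cases fuel with
  | zero => rfl
  | succ fuel => rw [pvRowA, if_neg h]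

-- A's outer while over row i from column j equals B's boundary fold over the
-- occupied columns ≥ j with start = j.
theorem rowA_eq_foldB (occ : List (Int × Int)) (n i : Int) (p : Int → Bool)
    (hp : ∀ c, p c = decide ((i, c) ∈ occ)) :
    ∀ (fuel : Nat) (j : Int) (d : PySem.Dict Int (List (Int × Int))), 0 ≤ j → (n - j).toNat < fuel →
    pvRowA occ n i fuel j d =
      (((PySem.List.pyRange j n 1).filter p ++ [n]).foldl
        (fun (q : PySem.Dict Int (List (Int × Int)) × Int) b =>
          let len := b - q.2
          let res' := if len ≥ 2 ∧ ¬ (q.1.contains len = true)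
            then q.1.insert len ((PySem.List.pyRange q.2 b 1).map (fun k => (i, k)))
            else q.1
          (res', b + 1))
        (d, j)).1 := by
  intro fuel
  induction fuel with
  | zero => intro j d hj0 hf; exfalso; omega
  | succ fuel ih =>
    intro j d hj0 hf
    by_cases h : j < n
    · rw [pvRowA, if_pos h]
      obtain ⟨b, hb1, hb2, hrun, hfil, hhead⟩ :=
        pvRunA_spec occ n i p hp n.toNat j 0 [] h (by omega)
      simp only [hrun]
      by_cases hbn : b < n
      · rw [ih (b + 1) _ (by omega) (by omega), hfil, hhead hbn]
        simp only [List.cons_append, List.foldl_cons]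
        congr 2
        simp
      · have hbn' : b = n := by omega
        rw [pvRowA_stop occ n i fuel (b + 1) _ (by omega), hfil, hbn']
        rw [PySem.List.pyRange_one_eq_nil (le_refl n)]
        simp only [List.filter_nil, List.nil_append, List.foldl_cons, List.foldl_nil]
        simp
    · rw [pvRowA_stop occ n i (fuel + 1) j d h,
          PySem.List.pyRange_one_eq_nil (by omega)]
      simp only [List.filter_nil, List.nil_append, List.foldl_cons, List.foldl_nil]
      split_ifs with hc
      · exact absurd hc.1 (by omega)
      · rfl

-- ===== VERDICT (by name: the statement is the Claim_ definition above) =====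
theorem mapear_tablero_spec : Claim_equal_mapear_tablero := by
  intro occ n _
  unfold Spec_mapear_tablero mapear_tablero mapear_tablero_alt pvRowB
  congr 1
  apply PySem.List.foldl_congr_mem
  intro d i _
  have hfil : (PySem.List.pyRange 0 n 1).filter
      (fun c => decide ((i, c) ∈ PySem.Set.ofList occ))
      = (PySem.List.pyRange 0 n 1).filter (fun c => decide ((i, c) ∈ occ)) := by
    apply List.filter_congr
    intro c _
    simp [PySem.Set.mem_ofList]
  simp only [hfil]
  exact rowA_eq_foldB occ n i (fun c => decide ((i, c) ∈ occ)) (fun _ => rfl)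
    (n.toNat + 1) 0 d (by omega) (by omega)
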